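-- pv_equiv track=rewrite | github.com/indiah444/advent-of-code | 2015/day_1.py | find_floor_no
-- ===== SOURCE A (Python) =====
-- def find_floor_no(direction: str) -> int:
--     """Returns the floor number based on a set of
--     directions given as a string consisting of
--     parentheses."""
--
--     floor_no = 0
--
--     for char in direction:
--         if char == "(":
--             floor_no += 1
--         elif char == ")":
--             floor_no -= 1
--
--     return floor_no
-- ===== SOURCE B (Python) =====
-- def find_floor_no(direction: str) -> int:
--     """Returns the floor number based on a set of
--     directions given as a string consisting of
--     parentheses."""
--     return direction.count("(") - direction.count(")")
-- ===== Notes on version B (the rewrite author's own statement) =====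
-- stated objective: simpler
-- what changed: Replaces the explicit character loop with an interleaved accumulator by two independent str.count scans whose difference is returned.
import Mathlib
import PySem

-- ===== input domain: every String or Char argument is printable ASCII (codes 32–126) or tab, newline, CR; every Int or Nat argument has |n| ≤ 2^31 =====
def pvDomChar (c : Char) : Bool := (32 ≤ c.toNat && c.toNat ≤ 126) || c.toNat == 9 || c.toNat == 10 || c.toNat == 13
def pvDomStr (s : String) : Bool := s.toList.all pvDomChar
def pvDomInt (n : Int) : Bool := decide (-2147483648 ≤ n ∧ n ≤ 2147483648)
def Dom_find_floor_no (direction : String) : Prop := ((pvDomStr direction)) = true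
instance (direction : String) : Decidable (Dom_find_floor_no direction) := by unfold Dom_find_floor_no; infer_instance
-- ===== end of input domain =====

-- B replaces A's single interleaved ± accumulator loop by two independent
-- library count scans whose difference is returned (objective: simpler).

-- ===== PORT A =====
-- literal port: one pass over the characters, floor_no += 1 on '(', -= 1 on ')'
def find_floor_no (direction : String) : Int :=
  direction.toList.foldl
    (fun floor_no char =>
      if char == '(' then floor_no + 1
      else if char == ')' then floor_no - 1
      else floor_no) 0

-- ===== PORT B =====
-- literal port of Source B: direction.count("(") - direction.count(")")
def find_floor_no_alt (direction : String) : Int :=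
  (PySem.Str.count direction "(" : Int) - (PySem.Str.count direction ")" : Int)

-- ===== PRECONDITION & SPEC =====
def Spec_find_floor_no (direction : String) (out : Int) : Prop := out = find_floor_no_alt direction
instance (direction : String) (out : Int) : Decidable (Spec_find_floor_no direction out) := by unfold Spec_find_floor_no; infer_instance

-- ===== CLAIM (what is proved, stated in full; the proofs are below) =====
def Claim_equal_find_floor_no : Prop := ∀ (direction : String), Dom_find_floor_no direction → Spec_find_floor_no direction (find_floor_no direction)

-- ===== LEMMAS AND PROOFS =====

-- Python's substring count with a single-character needle is the character count
lemma chars_count_go_singleton (c : Char) (s : List Char) (acc : Nat) :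
    PySem.Chars.count.go [c] s.length s acc = acc + s.count c := by
  induction s generalizing acc with
  | nil => simp [PySem.Chars.count.go]
  | cons h t ih =>
      simp only [List.length_cons, PySem.Chars.count.go, List.isPrefixOf_cons₂,
        List.isPrefixOf_nil_left, Bool.and_true, List.length_cons, List.length_nil,
        List.drop_succ_cons, List.drop_zero]
      by_cases hc : h = c
      · simp [hc, ih]; omega
      · simp [hc, Ne.symm hc, ih]

lemma chars_count_singleton (c : Char) (s : List Char) :
    PySem.Chars.count s [c] = s.count c := by
  simpa [PySem.Chars.count] using chars_count_go_singleton c s 0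

-- A's fold computes the running difference of '(' and ')' counts
lemma foldl_updown (s : List Char) (a : Int) :
    s.foldl (fun floor_no char =>
      if char == '(' then floor_no + 1
      else if char == ')' then floor_no - 1
      else floor_no) a = a + (s.count '(' : Int) - (s.count ')' : Int) := by
  induction s generalizing a with
  | nil => simp
  | cons h t ih =>
      rw [List.foldl_cons, ih]
      by_cases h1 : h = '('
      · simp only [h1, beq_self_eq_true, if_true, List.count_cons]
        simp; ring
      · by_cases h2 : h = ')'
        · simp only [h2, beq_self_eq_true, if_true, List.count_cons]
          simp
          ring
        · simp [h1, h2]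

-- ===== VERDICT (by name: the statement is the Claim_ definition above) =====
theorem find_floor_no_spec : Claim_equal_find_floor_no := by
  intro direction _
  unfold Spec_find_floor_no find_floor_no find_floor_no_alt
  rw [foldl_updown]
  simp [PySem.Str.count, chars_count_singleton]
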